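-- pv_equiv track=rewrite | github.com/mitul3737/My-University-Life-Learning | CSE110/Assignment/Assignment 6/19.py | function_name
-- ===== SOURCE A (Python) =====
-- def function_name(val_0):
--     flag = True
--     val_2 = val_0.lower()
--     val_1 = ["a", "b", "c", "d", "e", "f", "g", "h", "i", "j"]
--     for i in val_1:
--         if i in val_2:
--             flag = True
--         else:
--             flag = False
--             break
--     if flag:
--         return 5
--     else:
--         return 6
-- ===== SOURCE B (Python) =====
-- def function_name(val_0):
--     mask = 0
--     for ch in val_0.lower():
--         o = ord(ch) - 97
--         if 0 <= o < 10:
--             mask |= 1 << o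
--     return 5 if mask == 1023 else 6
-- ===== Notes on version B (the rewrite author's own statement) =====
-- stated objective: alternative
-- what changed: Instead of looping over the ten required letters and scanning the string for each (with a flag/break), B makes a single pass over the string itself, accumulating a 10-bit coverage bitmask of required letters seen, and compares the final mask to 1023.
import Mathlib
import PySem

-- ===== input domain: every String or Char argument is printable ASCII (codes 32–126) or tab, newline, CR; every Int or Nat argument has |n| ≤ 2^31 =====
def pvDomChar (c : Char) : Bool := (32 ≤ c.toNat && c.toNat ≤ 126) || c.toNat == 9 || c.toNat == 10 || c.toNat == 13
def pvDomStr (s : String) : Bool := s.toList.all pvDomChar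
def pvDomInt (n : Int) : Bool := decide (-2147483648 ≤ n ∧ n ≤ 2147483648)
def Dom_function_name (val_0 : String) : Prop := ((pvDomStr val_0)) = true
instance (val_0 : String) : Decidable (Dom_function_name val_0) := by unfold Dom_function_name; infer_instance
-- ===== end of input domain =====

-- B replaces A's letter-by-letter loop of substring scans (flag/break) with a single pass
-- over the string accumulating a 10-bit coverage bitmask; same return value.

-- ===== PORT A =====
-- the for-loop over val_1 with flag and break, transcribed as structural recursion on the list
def pvLoopA (letters : List String) (val_2 : String) : Bool :=
  match letters with
  | [] => true
  | i :: rest => if PySem.Str.isIn i val_2 then pvLoopA rest val_2 else false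

def function_name (val_0 : String) : Int :=
  let val_2 := PySem.Str.lower val_0
  let val_1 := ["a", "b", "c", "d", "e", "f", "g", "h", "i", "j"]
  if pvLoopA val_1 val_2 then 5 else 6

-- ===== PORT B =====
-- one iteration of Source B's loop body: o = ord(ch) - 97; if 0 <= o < 10: mask |= 1 << o
def pvStepB (m : Nat) (c : Char) : Nat :=
  if 0 ≤ (c.toNat : Int) - 97 ∧ (c.toNat : Int) - 97 < 10
  then m ||| (1 <<< ((c.toNat : Int) - 97).toNat) else m

def function_name_alt (val_0 : String) : Int :=
  let mask := (PySem.Str.lower val_0).toList.foldl pvStepB 0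
  if mask = 1023 then 5 else 6

-- ===== PRECONDITION & SPEC =====
def Spec_function_name (val_0 : String) (out : Int) : Prop := out = function_name_alt val_0
instance (val_0 : String) (out : Int) : Decidable (Spec_function_name val_0 out) := by unfold Spec_function_name; infer_instance

-- ===== CLAIM (what is proved, stated in full; the proofs are below) =====
def Claim_equal_function_name : Prop := ∀ (val_0 : String), Dom_function_name val_0 → Spec_function_name val_0 (function_name val_0)

-- ===== LEMMAS AND PROOFS =====

-- a single-character string is a substring iff the character occurs
theorem isIn_single_iff (c : Char) (sub s : String) (h : sub.toList = [c]) :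
    PySem.Str.isIn sub s = true ↔ c ∈ s.toList := by
  rw [PySem.Str.isIn_iff_infix, h]
  constructor
  · intro h; exact h.mem (by simp)
  · intro h
    obtain ⟨l, r, hs⟩ := List.append_of_mem h
    exact ⟨l, r, by simp [hs]⟩

theorem pvLoopA_iff (letters : List String) (v : String) :
    pvLoopA letters v = true ↔ ∀ i ∈ letters, PySem.Str.isIn i v = true := by
  induction letters with
  | nil => simp [pvLoopA]
  | cons i rest ih => cases h : PySem.Str.isIn i v <;> simp [pvLoopA, h, ih]

theorem stepB_testBit (m : Nat) (c : Char) (k : Nat) (hk : k < 10) :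
    (pvStepB m c).testBit k = (m.testBit k || decide (c.toNat = 97 + k)) := by
  unfold pvStepB
  split_ifs with h
  · obtain ⟨h1, h2⟩ := h
    have hj : (((c.toNat : Int) - 97)).toNat = c.toNat - 97 := by omega
    have h97 : 97 ≤ c.toNat := by omega
    rw [Nat.testBit_or, hj, Nat.shiftLeft_eq, one_mul, Nat.testBit_two_pow]
    congr 1
    rw [decide_eq_decide]
    omega
  · have : ¬ (c.toNat = 97 + k) := by
      intro hc
      apply h
      constructor <;> omega
    simp [this]

theorem foldl_stepB_testBit (l : List Char) (m : Nat) (k : Nat) (hk : k < 10) :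
    (l.foldl pvStepB m).testBit k = (m.testBit k || l.any fun c => decide (c.toNat = 97 + k)) := by
  induction l generalizing m with
  | nil => simp
  | cons c rest ih =>
    simp only [List.foldl_cons, List.any_cons]
    rw [ih, stepB_testBit m c k hk, Bool.or_assoc]

theorem foldl_stepB_lt (l : List Char) (m : Nat) (hm : m < 1024) :
    l.foldl pvStepB m < 1024 := by
  induction l generalizing m with
  | nil => simpa
  | cons c rest ih =>
    apply ih
    unfold pvStepB
    split_ifs with h
    · obtain ⟨h1, h2⟩ := h
      have : (((c.toNat : Int) - 97)).toNat < 10 := by omega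
      have h2pow : (1 <<< (((c.toNat : Int) - 97)).toNat) < 1024 := by
        rw [Nat.shiftLeft_eq, one_mul]
        calc 2 ^ (((c.toNat : Int) - 97)).toNat ≤ 2 ^ 9 := Nat.pow_le_pow_right (by norm_num) (by omega)
        _ < 1024 := by norm_num
      exact Nat.or_lt_two_pow (n := 10) hm h2pow
    · exact hm

theorem testBit_1023 (i : Nat) : (1023 : Nat).testBit i = decide (i < 10) := by
  by_cases h : i < 10
  · interval_cases i <;> decide
  · have : (1023 : Nat) < 2 ^ i := by
      calc (1023 : Nat) < 2 ^ 10 := by norm_num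
      _ ≤ 2 ^ i := Nat.pow_le_pow_right (by norm_num) (by omega)
    simp [Nat.testBit_lt_two_pow this, h]

theorem mask_eq_1023_iff (l : List Char) :
    l.foldl pvStepB 0 = 1023 ↔ ∀ k < 10, (l.any fun c => decide (c.toNat = 97 + k)) = true := by
  constructor
  · intro h k hk
    have := foldl_stepB_testBit l 0 k hk
    rw [h, testBit_1023] at this
    simpa [hk] using this.symm
  · intro h
    apply Nat.eq_of_testBit_eq
    intro i
    rw [testBit_1023]
    by_cases hi : i < 10
    · rw [foldl_stepB_testBit l 0 i hi]
      simp [h i hi, hi]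
    · have : l.foldl pvStepB 0 < 2 ^ i := by
        calc l.foldl pvStepB 0 < 1024 := foldl_stepB_lt l 0 (by norm_num)
        _ ≤ 2 ^ i := by
          have : 2 ^ 10 ≤ 2 ^ i := Nat.pow_le_pow_right (by norm_num) (by omega)
          simpa using this
      simp [Nat.testBit_lt_two_pow this, hi]

theorem any_toNat (l : List Char) (n : Nat) (d : Char) (hd : d.toNat = n) :
    (l.any fun c => decide (c.toNat = n)) = true ↔ d ∈ l := by
  rw [List.any_eq_true]
  constructor
  · rintro ⟨c, hc, h⟩
    simp only [decide_eq_true_eq] at h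
    have : c = d := Char.ext (UInt32.toNat_inj.mp (h.trans hd.symm))
    exact this ▸ hc
  · intro h
    exact ⟨d, h, by simp [hd]⟩

theorem both_iff (val_0 : String) :
    (pvLoopA ["a", "b", "c", "d", "e", "f", "g", "h", "i", "j"] (PySem.Str.lower val_0) = true)
      ↔ (List.foldl pvStepB 0 (PySem.Chars.lower val_0.toList) = 1023) := by
  rw [pvLoopA_iff, mask_eq_1023_iff, ← PySem.Str.toList_lower]
  constructor
  · intro h k hk
    simp only [List.mem_cons, List.not_mem_nil, or_false, forall_eq_or_imp, forall_eq] at h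
    obtain ⟨ha, hb, hc, hd, he, hf, hg, hh, hi, hj⟩ := h
    interval_cases k
    · exact (any_toNat _ _ 'a' rfl).2 ((isIn_single_iff 'a' _ _ rfl).1 ha)
    · exact (any_toNat _ _ 'b' rfl).2 ((isIn_single_iff 'b' _ _ rfl).1 hb)
    · exact (any_toNat _ _ 'c' rfl).2 ((isIn_single_iff 'c' _ _ rfl).1 hc)
    · exact (any_toNat _ _ 'd' rfl).2 ((isIn_single_iff 'd' _ _ rfl).1 hd)
    · exact (any_toNat _ _ 'e' rfl).2 ((isIn_single_iff 'e' _ _ rfl).1 he)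
    · exact (any_toNat _ _ 'f' rfl).2 ((isIn_single_iff 'f' _ _ rfl).1 hf)
    · exact (any_toNat _ _ 'g' rfl).2 ((isIn_single_iff 'g' _ _ rfl).1 hg)
    · exact (any_toNat _ _ 'h' rfl).2 ((isIn_single_iff 'h' _ _ rfl).1 hh)
    · exact (any_toNat _ _ 'i' rfl).2 ((isIn_single_iff 'i' _ _ rfl).1 hi)
    · exact (any_toNat _ _ 'j' rfl).2 ((isIn_single_iff 'j' _ _ rfl).1 hj)
  · intro h i hi
    fin_cases hi
    · exact (isIn_single_iff 'a' _ _ rfl).2 ((any_toNat _ _ 'a' rfl).1 (h 0 (by norm_num)))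
    · exact (isIn_single_iff 'b' _ _ rfl).2 ((any_toNat _ _ 'b' rfl).1 (h 1 (by norm_num)))
    · exact (isIn_single_iff 'c' _ _ rfl).2 ((any_toNat _ _ 'c' rfl).1 (h 2 (by norm_num)))
    · exact (isIn_single_iff 'd' _ _ rfl).2 ((any_toNat _ _ 'd' rfl).1 (h 3 (by norm_num)))
    · exact (isIn_single_iff 'e' _ _ rfl).2 ((any_toNat _ _ 'e' rfl).1 (h 4 (by norm_num)))
    · exact (isIn_single_iff 'f' _ _ rfl).2 ((any_toNat _ _ 'f' rfl).1 (h 5 (by norm_num)))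
    · exact (isIn_single_iff 'g' _ _ rfl).2 ((any_toNat _ _ 'g' rfl).1 (h 6 (by norm_num)))
    · exact (isIn_single_iff 'h' _ _ rfl).2 ((any_toNat _ _ 'h' rfl).1 (h 7 (by norm_num)))
    · exact (isIn_single_iff 'i' _ _ rfl).2 ((any_toNat _ _ 'i' rfl).1 (h 8 (by norm_num)))
    · exact (isIn_single_iff 'j' _ _ rfl).2 ((any_toNat _ _ 'j' rfl).1 (h 9 (by norm_num)))

-- ===== VERDICT (by name: the statement is the Claim_ definition above) =====
theorem function_name_spec : Claim_equal_function_name := by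
  intro val_0 _
  unfold Spec_function_name function_name function_name_alt
  by_cases h : pvLoopA ["a", "b", "c", "d", "e", "f", "g", "h", "i", "j"] (PySem.Str.lower val_0) = true
  · simp [h, (both_iff val_0).1 h]
  · have h2 : ¬ (List.foldl pvStepB 0 (PySem.Chars.lower val_0.toList) = 1023) :=
      fun hm => h ((both_iff val_0).2 hm)
    simp [h, h2]
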